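-- pv_equiv track=rewrite | github.com/Ingramml/CityVotes_DallasTX | build_site.py | derive_outcome
-- ===== SOURCE A (Python) =====
-- def derive_outcome(passed_val, final_action, matter_status):
--     """Derive vote outcome from CSV fields."""
--     p = str(passed_val).strip()
--     fa = (final_action or "").strip().upper()
--     ms = (matter_status or "").strip().upper()
--
--     # Check passed field first
--     if p == "1":
--         return "PASS"
--     if p == "0":
--         # Check if it's really a failure or a deferral/special action
--         if "DENIED" in fa:
--             return "FAIL"
--         if "DEFERRED" in fa:
--             return "CONTINUED"
--         if "DELETED" in fa:
--             return "WITHDRAWN"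
--         if "DID NOT PASS" in fa:
--             return "FAIL"
--         return "FAIL"
--
--     # Derive from final_action
--     if any(kw in fa for kw in ["APPROVED", "ADOPTED", "PASSED", "CONFIRMED", "ACCEPTED", "GRANTED", "SUSTAINED", "RATIFIED"]):
--         return "PASS"
--     if "AMENDED" in fa:
--         return "PASS"
--     if any(kw in fa for kw in ["DENIED", "REJECTED", "DEFEATED", "FAILED"]):
--         return "FAIL"
--     if "DEFERRED" in fa or "HELD" in fa:
--         return "CONTINUED"
--     if "DELETED" in fa or "WITHDRAWN" in fa:
--         return "WITHDRAWN"
--     if "REMANDED" in fa: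
--         return "CONTINUED"
--     if "TABLED" in fa:
--         return "TABLED"
--
--     # Derive from matter_status
--     if "APPROVED" in ms:
--         return "PASS"
--     if "DEFERRED" in ms:
--         return "CONTINUED"
--
--     return "PASS"  # Default for voted items
-- ===== SOURCE B (Python) =====
-- # Alternative strategy: instead of A's staged first-match if/return cascades, run
-- # ONE pass over a flat priority table (priority, keyword, source-field, outcome),
-- # keeping a running minimum-priority match; fa- and ms-derivation are merged into
-- # a single table (ms keywords at lower priority), so the whole decision is one loop.
--
-- _ZERO_TABLE = [
--     (0, "DENIED", "fa", "FAIL"),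
--     (1, "DEFERRED", "fa", "CONTINUED"),
--     (2, "DELETED", "fa", "WITHDRAWN"),
-- ]
--
-- _MAIN_TABLE = [
--     (0, "APPROVED", "fa", "PASS"),
--     (1, "ADOPTED", "fa", "PASS"),
--     (2, "PASSED", "fa", "PASS"),
--     (3, "CONFIRMED", "fa", "PASS"),
--     (4, "ACCEPTED", "fa", "PASS"),
--     (5, "GRANTED", "fa", "PASS"),
--     (6, "SUSTAINED", "fa", "PASS"),
--     (7, "RATIFIED", "fa", "PASS"),
--     (8, "AMENDED", "fa", "PASS"),
--     (9, "DENIED", "fa", "FAIL"),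
--     (10, "REJECTED", "fa", "FAIL"),
--     (11, "DEFEATED", "fa", "FAIL"),
--     (12, "FAILED", "fa", "FAIL"),
--     (13, "DEFERRED", "fa", "CONTINUED"),
--     (14, "HELD", "fa", "CONTINUED"),
--     (15, "DELETED", "fa", "WITHDRAWN"),
--     (16, "WITHDRAWN", "fa", "WITHDRAWN"),
--     (17, "REMANDED", "fa", "CONTINUED"),
--     (18, "TABLED", "fa", "TABLED"),
--     (19, "APPROVED", "ms", "PASS"),
--     (20, "DEFERRED", "ms", "CONTINUED"),
-- ]
--
--
-- def derive_outcome(passed_val, final_action, matter_status):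
--     """Derive vote outcome from CSV fields."""
--     p = str(passed_val).strip()
--     fa = (final_action or "").strip().upper()
--     ms = (matter_status or "").strip().upper()
--     if p == "1":
--         return "PASS"
--     if p == "0":
--         table, default = _ZERO_TABLE, "FAIL"
--     else:
--         table, default = _MAIN_TABLE, "PASS"
--     best = None
--     for pr, kw, src, out in table:
--         text = fa if src == "fa" else ms
--         if kw in text and (best is None or pr < best[0]):
--             best = (pr, out)
--     return best[1] if best is not None else default
-- ===== Notes on version B (the rewrite author's own statement) =====
-- stated objective: alternative
-- what changed: A's staged first-match if/return cascades are replaced by a single pass over one flat priority table (priority, keyword, source field, outcome) with a running minimum-priority match accumulator; the fa- and matter_status-derivation stages are merged into one loop (ms keywords at lower priority), and the redundant 'DID NOT PASS' test (same result as the default FAIL) is dropped.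
import Mathlib
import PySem

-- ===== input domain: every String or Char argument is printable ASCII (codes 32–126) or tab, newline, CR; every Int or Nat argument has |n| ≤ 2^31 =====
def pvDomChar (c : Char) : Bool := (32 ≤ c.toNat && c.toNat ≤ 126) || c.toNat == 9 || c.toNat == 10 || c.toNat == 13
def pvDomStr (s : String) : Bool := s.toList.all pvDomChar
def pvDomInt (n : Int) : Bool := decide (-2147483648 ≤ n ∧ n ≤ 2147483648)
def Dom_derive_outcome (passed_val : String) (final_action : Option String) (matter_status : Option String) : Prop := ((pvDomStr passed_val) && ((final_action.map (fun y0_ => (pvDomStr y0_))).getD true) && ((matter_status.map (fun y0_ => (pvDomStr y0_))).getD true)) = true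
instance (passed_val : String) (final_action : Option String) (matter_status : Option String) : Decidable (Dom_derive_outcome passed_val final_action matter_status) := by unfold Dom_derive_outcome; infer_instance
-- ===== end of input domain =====

-- B replaces A's staged first-match cascades by one full pass over a flat priority
-- table with a running minimum-priority match (alternative decomposition, same cost).

-- ===== PORT A =====
def derive_outcome (passed_val : String) (final_action : Option String) (matter_status : Option String) : String :=
  let p := PySem.Str.strip passed_val
  let fa := PySem.Str.upper (PySem.Str.strip (final_action.getD ""))
  let ms := PySem.Str.upper (PySem.Str.strip (matter_status.getD ""))
  if p = "1" then "PASS"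
  else if p = "0" then
    if PySem.Str.isIn "DENIED" fa then "FAIL"
    else if PySem.Str.isIn "DEFERRED" fa then "CONTINUED"
    else if PySem.Str.isIn "DELETED" fa then "WITHDRAWN"
    else if PySem.Str.isIn "DID NOT PASS" fa then "FAIL"
    else "FAIL"
  else if ["APPROVED", "ADOPTED", "PASSED", "CONFIRMED", "ACCEPTED", "GRANTED", "SUSTAINED", "RATIFIED"].any (fun kw => PySem.Str.isIn kw fa) then "PASS"
  else if PySem.Str.isIn "AMENDED" fa then "PASS"
  else if ["DENIED", "REJECTED", "DEFEATED", "FAILED"].any (fun kw => PySem.Str.isIn kw fa) then "FAIL"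
  else if PySem.Str.isIn "DEFERRED" fa || PySem.Str.isIn "HELD" fa then "CONTINUED"
  else if PySem.Str.isIn "DELETED" fa || PySem.Str.isIn "WITHDRAWN" fa then "WITHDRAWN"
  else if PySem.Str.isIn "REMANDED" fa then "CONTINUED"
  else if PySem.Str.isIn "TABLED" fa then "TABLED"
  else if PySem.Str.isIn "APPROVED" ms then "PASS"
  else if PySem.Str.isIn "DEFERRED" ms then "CONTINUED"
  else "PASS"

-- ===== PORT B =====
-- flat tables: (priority, keyword, source field, outcome)
def pvZeroTable : List (Nat × String × String × String) :=
  [(0, "DENIED", "fa", "FAIL"),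
   (1, "DEFERRED", "fa", "CONTINUED"),
   (2, "DELETED", "fa", "WITHDRAWN")]

def pvMainTable : List (Nat × String × String × String) :=
  [(0, "APPROVED", "fa", "PASS"),
   (1, "ADOPTED", "fa", "PASS"),
   (2, "PASSED", "fa", "PASS"),
   (3, "CONFIRMED", "fa", "PASS"),
   (4, "ACCEPTED", "fa", "PASS"),
   (5, "GRANTED", "fa", "PASS"),
   (6, "SUSTAINED", "fa", "PASS"),
   (7, "RATIFIED", "fa", "PASS"),
   (8, "AMENDED", "fa", "PASS"),
   (9, "DENIED", "fa", "FAIL"),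
   (10, "REJECTED", "fa", "FAIL"),
   (11, "DEFEATED", "fa", "FAIL"),
   (12, "FAILED", "fa", "FAIL"),
   (13, "DEFERRED", "fa", "CONTINUED"),
   (14, "HELD", "fa", "CONTINUED"),
   (15, "DELETED", "fa", "WITHDRAWN"),
   (16, "WITHDRAWN", "fa", "WITHDRAWN"),
   (17, "REMANDED", "fa", "CONTINUED"),
   (18, "TABLED", "fa", "TABLED"),
   (19, "APPROVED", "ms", "PASS"),
   (20, "DEFERRED", "ms", "CONTINUED")]

-- 'best is None or pr < best[0]'
def pvBetter (best : Option (Nat × String)) (pr : Nat) : Bool :=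
  match best with
  | none => true
  | some b => pr < b.1

-- one iteration of B's loop
def pvStep (fa ms : String) (best : Option (Nat × String)) (e : Nat × String × String × String) : Option (Nat × String) :=
  if PySem.Str.isIn e.2.1 (if e.2.2.1 == "fa" then fa else ms) && pvBetter best e.1 then some (e.1, e.2.2.2) else best

def derive_outcome_alt (passed_val : String) (final_action : Option String) (matter_status : Option String) : String :=
  let p := PySem.Str.strip passed_val
  let fa := PySem.Str.upper (PySem.Str.strip (final_action.getD ""))
  let ms := PySem.Str.upper (PySem.Str.strip (matter_status.getD ""))
  if p = "1" then "PASS"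
  else
    let td := if p = "0" then (pvZeroTable, "FAIL") else (pvMainTable, "PASS")
    match td.1.foldl (pvStep fa ms) none with
    | some b => b.2
    | none => td.2

-- ===== PRECONDITION & SPEC =====
def Spec_derive_outcome (passed_val : String) (final_action : Option String) (matter_status : Option String) (out : String) : Prop := out = derive_outcome_alt passed_val final_action matter_status
instance (passed_val : String) (final_action : Option String) (matter_status : Option String) (out : String) : Decidable (Spec_derive_outcome passed_val final_action matter_status out) := by unfold Spec_derive_outcome; infer_instance

-- ===== CLAIM (what is proved, stated in full; the proofs are below) =====
def Claim_equal_derive_outcome : Prop := ∀ (passed_val : String) (final_action : Option String) (matter_status : Option String), Dom_derive_outcome passed_val final_action matter_status → Spec_derive_outcome passed_val final_action matter_status (derive_outcome passed_val final_action matter_status)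

-- ===== LEMMAS AND PROOFS =====

-- first-match reading of a table (proof device only)
def pvFirst (fa ms : String) : List (Nat × String × String × String) → Option (Nat × String)
  | [] => none
  | e :: rest =>
      if PySem.Str.isIn e.2.1 (if e.2.2.1 == "fa" then fa else ms) then some (e.1, e.2.2.2)
      else pvFirst fa ms rest

theorem pv_fold_keep (fa ms : String) (b : Nat × String) :
    ∀ (t : List (Nat × String × String × String)), (∀ e ∈ t, b.1 ≤ e.1) →
    t.foldl (pvStep fa ms) (some b) = some b := by
  intro t
  induction t with
  | nil => intro _; rfl
  | cons e rest ih =>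
      intro h
      have hle : b.1 ≤ e.1 := h e (by simp)
      have hstep : pvStep fa ms (some b) e = some b := by
        unfold pvStep pvBetter
        have hlt : (decide (e.1 < b.1)) = false := by simp; omega
        simp only [hlt, Bool.and_false]
        rfl
      simp only [List.foldl_cons, hstep]
      exact ih (fun e' he' => h e' (by simp [he']))

theorem pv_fold_first (fa ms : String) :
    ∀ (t : List (Nat × String × String × String)),
    List.Pairwise (fun a b => a.1 < b.1) t →
    t.foldl (pvStep fa ms) none = pvFirst fa ms t := by
  intro t
  induction t with
  | nil => intro _; rfl
  | cons e rest ih =>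
      intro hp
      rw [List.pairwise_cons] at hp
      simp only [List.foldl_cons, pvFirst]
      by_cases hm : PySem.Str.isIn e.2.1 (if e.2.2.1 == "fa" then fa else ms) = true
      · have hstep : pvStep fa ms none e = some (e.1, e.2.2.2) := by
          unfold pvStep pvBetter; rw [hm]; rfl
        rw [hstep, pv_fold_keep fa ms _ rest (fun e' he' => le_of_lt (hp.1 e' he')), if_pos hm]
      · rw [Bool.not_eq_true] at hm
        have hstep : pvStep fa ms none e = none := by
          unfold pvStep pvBetter; rw [hm]; rfl
        rw [hstep, ih hp.2, if_neg (by rw [hm]; exact Bool.false_ne_true)]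

set_option maxHeartbeats 1000000 in
theorem pv_zero_eq (fa ms : String) :
    (match List.foldl (pvStep fa ms) none pvZeroTable with
     | some b => b.2
     | none => "FAIL") =
    (if PySem.Str.isIn "DENIED" fa then "FAIL"
     else if PySem.Str.isIn "DEFERRED" fa then "CONTINUED"
     else if PySem.Str.isIn "DELETED" fa then "WITHDRAWN"
     else if PySem.Str.isIn "DID NOT PASS" fa then "FAIL"
     else "FAIL") := by
  rw [pv_fold_first fa ms pvZeroTable (by decide)]
  simp only [pvFirst, pvZeroTable, beq_self_eq_true, if_true]
  split_ifs <;> rfl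

theorem pv_match_if (c : Prop) [Decidable c] (p : Nat) (v : String) (r : Option (Nat × String)) (d : String) :
    (match (if c then some (p, v) else r) with
     | some b => b.2
     | none => d) =
    (if c then v else (match r with | some b => b.2 | none => d)) := by
  split_ifs <;> rfl

theorem pv_if_or {α : Type} (a b : Bool) (v x : α) :
    (if (a || b) = true then v else x) = if a = true then v else if b = true then v else x := by
  cases a <;> cases b <;> simp

set_option maxHeartbeats 1000000 in
theorem pv_main_eq (fa ms : String) :
    (match List.foldl (pvStep fa ms) none pvMainTable with
     | some b => b.2
     | none => "PASS") =
    (if ["APPROVED", "ADOPTED", "PASSED", "CONFIRMED", "ACCEPTED", "GRANTED", "SUSTAINED", "RATIFIED"].any (fun kw => PySem.Str.isIn kw fa) then "PASS"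
     else if PySem.Str.isIn "AMENDED" fa then "PASS"
     else if ["DENIED", "REJECTED", "DEFEATED", "FAILED"].any (fun kw => PySem.Str.isIn kw fa) then "FAIL"
     else if PySem.Str.isIn "DEFERRED" fa || PySem.Str.isIn "HELD" fa then "CONTINUED"
     else if PySem.Str.isIn "DELETED" fa || PySem.Str.isIn "WITHDRAWN" fa then "WITHDRAWN"
     else if PySem.Str.isIn "REMANDED" fa then "CONTINUED"
     else if PySem.Str.isIn "TABLED" fa then "TABLED"
     else if PySem.Str.isIn "APPROVED" ms then "PASS"
     else if PySem.Str.isIn "DEFERRED" ms then "CONTINUED"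
     else "PASS") := by
  rw [pv_fold_first fa ms pvMainTable (by decide)]
  simp only [pvFirst, pvMainTable, beq_self_eq_true, if_true,
    show (("ms" : String) == "fa") = false from rfl, Bool.false_eq_true, if_false]
  simp only [pv_match_if]
  simp only [List.any_cons, List.any_nil, Bool.or_false, pv_if_or]

-- ===== VERDICT (by name: the statement is the Claim_ definition above) =====
theorem derive_outcome_spec : Claim_equal_derive_outcome := by
  intro passed_val final_action matter_status _
  unfold Spec_derive_outcome derive_outcome derive_outcome_alt
  set p := PySem.Str.strip passed_val with hp
  set fa := PySem.Str.upper (PySem.Str.strip (final_action.getD "")) with hfa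
  set ms := PySem.Str.upper (PySem.Str.strip (matter_status.getD "")) with hms
  by_cases h1 : p = "1"
  · rw [if_pos h1, if_pos h1]
  · rw [if_neg h1, if_neg h1]
    by_cases h0 : p = "0"
    · simp only [if_pos h0]
      exact (pv_zero_eq fa ms).symm
    · simp only [if_neg h0]
      exact (pv_main_eq fa ms).symm
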